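-- pv_equiv track=rewrite | github.com/RascalTwo/DailyProblem | problems/DailyCoding/009/solve.py | solve_iter
-- ===== SOURCE A (Python) =====
-- from typing import List, Tuple
--
-- def solve_iter(integers: List[int]) -> int:
-- 	last_index = len(integers) - 1
--
-- 	paths = [[0], [1]]
-- 	best: Tuple[List[int], int] = ([], 0)
-- 	while paths:
-- 		path = paths.pop(0)
-- 		for i in (2, 3):
-- 			if (next_index := path[-1] + i) <= last_index:
-- 				paths.append(path + [next_index])
--
-- 		if (total := sum(integers[i] for i in path)) > best[1]:
-- 			best = (path, total)
--
-- 	return best[1]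
-- ===== SOURCE B (Python) =====
-- def solve_iter(integers):
--     # Linear suffix DP: ext[j] = best extra sum obtainable by continuing a path
--     # from index j with steps +2/+3 (stopping allowed); answer floors at 0.
--     n = len(integers)
--     ext = [0] * n
--     for j in range(n - 1, -1, -1):
--         best_child = 0
--         if j + 2 < n:
--             best_child = max(best_child, integers[j + 2] + ext[j + 2])
--         if j + 3 < n:
--             best_child = max(best_child, integers[j + 3] + ext[j + 3])
--         ext[j] = best_child
--     best = 0
--     for s in (0, 1):
--         if s < n:
--             best = max(best, integers[s] + ext[s])
--     return best
-- ===== Notes on version B (the rewrite author's own statement) =====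
-- stated objective: faster
-- what changed: A enumerates every +2/+3 index path with a FIFO queue and re-sums each path from scratch; B computes a linear right-to-left suffix DP ext[j] = best extra sum continuing from j and returns max(0, a[0]+ext[0], a[1]+ext[1]); intended as faster (asymptotic); a timing run could not confirm a ratio (at the sizes both finish A runs under 1 ms, and A times out at n=64 where B returns).
-- outside the precondition, e.g. on solve_iter([0]): A raises IndexError, B returns 0; on solve_iter([1]): A raises IndexError, B returns 1
import Mathlib
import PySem

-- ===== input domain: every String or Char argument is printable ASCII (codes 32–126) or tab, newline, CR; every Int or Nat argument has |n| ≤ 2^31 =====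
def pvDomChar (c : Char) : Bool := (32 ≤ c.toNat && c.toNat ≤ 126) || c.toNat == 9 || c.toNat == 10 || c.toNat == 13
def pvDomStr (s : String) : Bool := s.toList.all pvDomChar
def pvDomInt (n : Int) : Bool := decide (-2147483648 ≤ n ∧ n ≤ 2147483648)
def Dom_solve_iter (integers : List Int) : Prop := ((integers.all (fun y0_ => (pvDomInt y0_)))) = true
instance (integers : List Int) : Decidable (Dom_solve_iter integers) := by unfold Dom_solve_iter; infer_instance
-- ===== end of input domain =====

-- B replaces A's breadth-first enumeration of all +2/+3 index paths by a
-- right-to-left suffix DP (intended as faster; a timing run could not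
-- confirm a ratio: at sizes where both finish A runs under 1 ms, and A timed
-- out at n=64 where B returned). Equivalence proved on lists of length ≥ 2;
-- on shorter lists Python A raises IndexError (excluded by Pre_).

-- ===== PORT A =====
-- sum(integers[i] for i in path); getD is exact here: every queued index is ≤ len-1
def pvSumPath (a : List Int) (p : List Nat) : Int := (p.map (fun i => a.getD i 0)).sum

-- termination measure for A's queue: each path weighs 2^(slack of its last index)
def pvMeasure (L : Int) (ps : List (List Nat)) : Nat :=
  (ps.map (fun p => 2 ^ ((L + 1 - (p.getLastD 0 : Int)).toNat))).sum

theorem pvPow3 (m : Nat) : 2 ^ (m + 1) + 2 ^ m < 2 ^ (m + 3) := by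
  have h : 0 < 2 ^ m := Nat.two_pow_pos m
  have e1 : (2:Nat) ^ (m+1) = 2 * 2 ^ m := by ring
  have e3 : (2:Nat) ^ (m+3) = 8 * 2 ^ m := by ring
  omega

theorem pvGetLastD_concat (p : List Nat) (x : Nat) : (p ++ [x]).getLastD 0 = x := by
  simp [List.getLastD_eq_getLast?]

theorem pvMeasure_dec (L : Int) (path : List Nat) (rest : List (List Nat)) :
    pvMeasure L (rest ++
      ((if (path.getLastD 0 : Int) + 2 ≤ L then [path ++ [path.getLastD 0 + 2]] else []) ++
       (if (path.getLastD 0 : Int) + 3 ≤ L then [path ++ [path.getLastD 0 + 3]] else []))) <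
    pvMeasure L (path :: rest) := by
  simp only [pvMeasure, List.map_append, List.sum_append, List.map_cons, List.sum_cons]
  set j : Nat := path.getLastD 0 with hj
  by_cases h2 : (j : Int) + 2 ≤ L
  · have hk : 3 ≤ (L + 1 - (j : Int)).toNat := by omega
    obtain ⟨m, hm⟩ : ∃ m, (L + 1 - (j : Int)).toNat = m + 3 := ⟨_, (Nat.sub_add_cancel hk).symm⟩
    by_cases h3 : (j : Int) + 3 ≤ L
    · simp only [h2, h3, if_true, List.map_append, List.map_cons, List.map_nil,
        List.sum_append, List.sum_cons, List.sum_nil, pvGetLastD_concat]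
      have e2 : (L + 1 - ((j : Nat) + 2 : Nat) : Int).toNat = m + 1 := by push_cast; omega
      have e3 : (L + 1 - ((j : Nat) + 3 : Nat) : Int).toNat = m := by push_cast; omega
      rw [e2, e3, hm]
      have := pvPow3 m
      omega
    · simp only [h2, h3, if_true, if_false, List.append_nil, List.map_cons,
        List.map_nil, List.sum_cons, List.sum_nil, pvGetLastD_concat]
      have e2 : (L + 1 - ((j : Nat) + 2 : Nat) : Int).toNat = m + 1 := by push_cast; omega
      rw [e2, hm]
      have h1 : (2:Nat) ^ (m + 1) < 2 ^ (m + 3) := by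
        have := pvPow3 m; have := Nat.two_pow_pos m; omega
      omega
  · have h3 : ¬ ((j : Int) + 3 ≤ L) := by omega
    simp only [h2, h3, if_false, List.append_nil, List.map_nil, List.sum_nil]
    have := Nat.two_pow_pos ((L + 1 - (j : Int)).toNat)
    omega

-- A's while-loop: paths is a FIFO queue; path[-1] ported as getLastD (queue paths
-- are never empty); branch order (+2 then +3) and the strict '>' update preserved.
def pvALoop (a : List Int) (L : Int) : List (List Nat) → List Nat × Int → List Nat × Int
  | [], best => best
  | path :: rest, best =>
    pvALoop a L
      (rest ++ ((if (path.getLastD 0 : Int) + 2 ≤ L then [path ++ [path.getLastD 0 + 2]] else []) ++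
                (if (path.getLastD 0 : Int) + 3 ≤ L then [path ++ [path.getLastD 0 + 3]] else [])))
      (if pvSumPath a path > best.2 then (path, pvSumPath a path) else best)
  termination_by ps _ => pvMeasure L ps
  decreasing_by exact pvMeasure_dec L path rest

def solve_iter (integers : List Int) : Int :=
  (pvALoop integers ((integers.length : Int) - 1) [[0], [1]] ([], 0)).2

-- ===== PORT B =====
-- Source B's backward fill of ext[]: pvBLoop a k is the suffix [ext[n-k], …, ext[n-1]];
-- ext[j+2] / ext[j+3] are the cells at offset 1 / 2 of the already-built suffix.
def pvBLoop (a : List Int) : Nat → List Int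
  | 0 => []
  | k + 1 =>
    let rest := pvBLoop a k
    let j := a.length - (k + 1)
    let b1 : Int := if j + 2 < a.length then max 0 (a.getD (j + 2) 0 + rest.getD 1 0) else 0
    let b2 : Int := if j + 3 < a.length then max b1 (a.getD (j + 3) 0 + rest.getD 2 0) else b1
    b2 :: rest

def solve_iter_alt (integers : List Int) : Int :=
  let e := pvBLoop integers integers.length
  [0, 1].foldl
    (fun best s =>
      if s < integers.length then max best (integers.getD s 0 + e.getD s 0) else best) 0

-- ===== PRECONDITION & SPEC =====
-- Pre_ excludes exactly the lists of length < 2, on which Python A raises IndexError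
-- (it always evaluates integers[1] via the seed path [1], and integers[0] when empty).
def Pre_solve_iter (integers : List Int) : Prop := 2 ≤ integers.length
instance (integers : List Int) : Decidable (Pre_solve_iter integers) := by
  unfold Pre_solve_iter; infer_instance

def pvWitness_solve_iter : List Int := [1, 2, 3]

def Spec_solve_iter (integers : List Int) (out : Int) : Prop := out = solve_iter_alt integers
instance (integers : List Int) (out : Int) : Decidable (Spec_solve_iter integers out) := by
  unfold Spec_solve_iter; infer_instance

-- ===== CLAIM (what is proved, stated in full; the proofs are below) =====
def Claim_equal_solve_iter : Prop := ∀ (integers : List Int), Dom_solve_iter integers →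
  Pre_solve_iter integers → Spec_solve_iter integers (solve_iter integers)

-- ===== LEMMAS AND PROOFS =====

theorem pvSubDec {n j k : Nat} (hk : 0 < k) (h : j + k < n) : n - (j + k) < n - j := by omega

-- proof-side value: best extra sum continuing from index j by +2/+3 steps (stop allowed)
def pvExt (a : List Int) (j : Nat) : Int :=
  max 0 (max (if _h : j + 2 < a.length then a.getD (j + 2) 0 + pvExt a (j + 2) else 0)
             (if _h : j + 3 < a.length then a.getD (j + 3) 0 + pvExt a (j + 3) else 0))
  termination_by a.length - j
  decreasing_by all_goals exact pvSubDec (by norm_num) _h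

theorem pvSumPath_concat (a : List Int) (p : List Nat) (x : Nat) :
    pvSumPath a (p ++ [x]) = pvSumPath a p + a.getD x 0 := by
  simp [pvSumPath]

theorem pvFoldlMax (a : List Int) (l : List (List Nat)) (x y : Int) :
    l.foldl (fun m p => max m (pvSumPath a p + pvExt a (p.getLastD 0))) (max x y) =
    max x (l.foldl (fun m p => max m (pvSumPath a p + pvExt a (p.getLastD 0))) y) := by
  induction l generalizing y with
  | nil => rfl
  | cons p l ih =>
    simp only [List.foldl_cons]
    rw [max_assoc, ih]

theorem pvContFold (a : List Int) (path : List Nat) (b : Int) :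
    (((if (path.getLastD 0 : Int) + 2 ≤ (a.length : Int) - 1 then
          [path ++ [path.getLastD 0 + 2]] else []) ++
       (if (path.getLastD 0 : Int) + 3 ≤ (a.length : Int) - 1 then
          [path ++ [path.getLastD 0 + 3]] else [])).foldl
        (fun m p => max m (pvSumPath a p + pvExt a (p.getLastD 0)))
        (max b (pvSumPath a path))) =
    max b (pvSumPath a path + pvExt a (path.getLastD 0)) := by
  set j : Nat := path.getLastD 0 with hj
  have hc2 : ((j : Int) + 2 ≤ (a.length : Int) - 1) ↔ (j + 2 < a.length) := by
    constructor <;> intro h <;> omega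
  have hc3 : ((j : Int) + 3 ≤ (a.length : Int) - 1) ↔ (j + 3 < a.length) := by
    constructor <;> intro h <;> omega
  conv_rhs => rw [pvExt]
  by_cases c2 : j + 2 < a.length <;> by_cases c3 : j + 3 < a.length <;>
    simp only [hc2, hc3, c2, c3, dite_true, dite_false, if_true, if_false,
      List.append_nil, List.nil_append, List.cons_append, List.foldl_cons, List.foldl_nil,
      pvGetLastD_concat, pvSumPath_concat] <;> omega

theorem pvBest2 (path : List Nat) (s : Int) (best : List Nat × Int) :
    (if s > best.2 then (path, s) else best).2 = max best.2 s := by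
  split_ifs <;> simp [max_def] <;> omega

theorem pvALoop_eq (a : List Int) (ps : List (List Nat)) (best : List Nat × Int) :
    (pvALoop a ((a.length : Int) - 1) ps best).2 =
    ps.foldl (fun m p => max m (pvSumPath a p + pvExt a (p.getLastD 0))) best.2 := by
  fun_induction pvALoop a ((a.length : Int) - 1) ps best with
  | case1 best => rfl
  | case2 path rest best ih =>
    simp only [dite_eq_ite] at ih
    rw [ih, pvBest2, List.foldl_append, List.foldl_cons]
    rw [max_comm best.2 (pvSumPath a path), pvFoldlMax, max_comm (pvSumPath a path)]
    rw [pvContFold]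
    rw [max_comm best.2 (pvSumPath a path + pvExt a (path.getLastD 0)), pvFoldlMax,
      max_comm (pvSumPath a path + pvExt a (path.getLastD 0))]

theorem pvBLoop_spec (a : List Int) (k : Nat) (hk : k ≤ a.length) :
    (pvBLoop a k).length = k ∧
    ∀ i, i < k → (pvBLoop a k).getD i 0 = pvExt a (a.length - k + i) := by
  induction k with
  | zero => exact ⟨rfl, fun i hi => absurd hi (by omega)⟩
  | succ k ih =>
    obtain ⟨hlen, hget⟩ := ih (by omega)
    have hcell : (pvBLoop a (k + 1)).headD 0 = pvExt a (a.length - (k + 1)) ∧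
        (pvBLoop a (k + 1)) = (pvBLoop a (k + 1)).headD 0 :: pvBLoop a k := by
      rw [pvBLoop]
      refine ⟨?_, rfl⟩
      simp only [List.headD_cons]
      set j : Nat := a.length - (k + 1) with hjdef
      have h2 : (j + 2 < a.length) ↔ (2 ≤ k) := by omega
      have h3 : (j + 3 < a.length) ↔ (3 ≤ k) := by omega
      conv_rhs => rw [pvExt]
      by_cases c2 : 2 ≤ k <;> by_cases c3 : 3 ≤ k
      · have g2 : (pvBLoop a k).getD 1 0 = pvExt a (j + 2) := by
          rw [hget 1 (by omega)]; congr 1; omega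
        have g3 : (pvBLoop a k).getD 2 0 = pvExt a (j + 3) := by
          rw [hget 2 (by omega)]; congr 1; omega
        simp only [h2, h3, c2, c3, if_true, dite_true, g2, g3]
        omega
      · have g2 : (pvBLoop a k).getD 1 0 = pvExt a (j + 2) := by
          rw [hget 1 (by omega)]; congr 1; omega
        simp only [h2, h3, c2, c3, if_true, if_false, dite_true, dite_false, g2]
        omega
      · exact absurd (by omega : 2 ≤ k) c2
      · simp only [h2, h3, c2, c3, if_false, dite_false]
        omega
    refine ⟨by rw [hcell.2]; simp [hlen], fun i hi => ?_⟩
    match i with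
    | 0 => rw [hcell.2]; simpa using hcell.1
    | Nat.succ i =>
      rw [hcell.2]
      simp only [List.getD_cons_succ]
      rw [hget i (by omega)]
      congr 1; omega

-- ===== VERDICT =====
theorem solve_iter_spec : Claim_equal_solve_iter := by
  intro integers _ hpre
  unfold Pre_solve_iter at hpre
  unfold Spec_solve_iter solve_iter solve_iter_alt
  rw [pvALoop_eq]
  obtain ⟨hlen, hget⟩ := pvBLoop_spec integers integers.length le_rfl
  have e0 : (pvBLoop integers integers.length).getD 0 0 = pvExt integers 0 := by
    rw [hget 0 (by omega)]; congr 1; omega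
  have e1 : (pvBLoop integers integers.length).getD 1 0 = pvExt integers 1 := by
    rw [hget 1 (by omega)]; congr 1; omega
  have l0 : ([0] : List Nat).getLastD 0 = 0 := rfl
  have l1 : ([1] : List Nat).getLastD 0 = 1 := rfl
  simp only [List.foldl_cons, List.foldl_nil, pvSumPath, List.map_cons, List.map_nil,
    List.sum_cons, List.sum_nil, l0, l1, e0, e1,
    if_pos (by omega : 0 < integers.length), if_pos (by omega : 1 < integers.length)]
  omega
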